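-- pv_equiv track=rewrite | github.com/mowja/CbtProgram_json | app/utils/labels.py | normalize_user_answer
-- ===== SOURCE A (Python) =====
-- LETTERS = "ABCDEFGHIJKLMNOPQRSTUVWXYZ"
--
-- def normalize_user_answer(s: str, max_labels: int) -> list[str]:
--     """사용자 입력을 ['A','C'] 형태로 정규화"""
--     if not s:
--         return []
--     s = s.strip().upper()
--     for ch in [" ", ",", "/", "&", ";", "|"]:
--         s = s.replace(ch, "")
--     out = []
--     map_num = {str(i): LETTERS[i-1] for i in range(1, 27)}
--     allowed = set(LETTERS[:max_labels])
--     for ch in s: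
--         if ch in allowed:
--             out.append(ch)
--         elif ch in map_num and map_num[ch] in allowed:
--             out.append(map_num[ch])
--     return sorted(set(out), key=lambda x: LETTERS.index(x))
-- ===== SOURCE B (Python) =====
-- LETTERS = "ABCDEFGHIJKLMNOPQRSTUVWXYZ"
--
-- def normalize_user_answer(s: str, max_labels: int) -> list[str]:
--     """Normalize user input to a sorted list like ['A','C'] by scanning the
--     allowed alphabet in order and testing membership in the input."""
--     if not s:
--         return []
--     t = s.strip().upper()
--     result = []
--     for i, L in enumerate(LETTERS[:max_labels]):
--         if L in t or (i < 9 and str(i + 1) in t):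
--             result.append(L)
--     return result
-- ===== Notes on version B (the rewrite author's own statement) =====
-- stated objective: simpler
-- what changed: Instead of stripping separators, mapping input characters through a digit dictionary, deduplicating with a set and sorting by alphabet index, B scans the allowed alphabet prefix in order and appends each letter whose character (or, for the first nine, its digit) occurs in the input, producing the sorted deduplicated list directly.
import Mathlib
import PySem

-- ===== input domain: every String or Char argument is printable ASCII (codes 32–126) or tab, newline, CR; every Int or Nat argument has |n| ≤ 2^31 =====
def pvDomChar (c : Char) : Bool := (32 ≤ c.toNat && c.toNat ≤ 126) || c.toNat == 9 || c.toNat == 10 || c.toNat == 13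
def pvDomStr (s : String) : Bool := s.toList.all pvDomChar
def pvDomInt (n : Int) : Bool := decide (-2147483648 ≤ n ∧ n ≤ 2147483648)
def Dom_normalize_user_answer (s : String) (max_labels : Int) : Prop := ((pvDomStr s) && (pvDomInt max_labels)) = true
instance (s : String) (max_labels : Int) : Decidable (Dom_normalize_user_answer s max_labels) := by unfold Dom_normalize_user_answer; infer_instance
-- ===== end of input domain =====

-- B rebuilds the answer by scanning the allowed alphabet prefix in order and testing
-- membership in the input, so the dedup-set and final key-sort of A disappear (objective: simpler).


-- ===== PORT A =====
-- LETTERS = "ABCDEFGHIJKLMNOPQRSTUVWXYZ"  (Python 1-char strings are represented as Char;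
-- the returned list of 1-char strings is rebuilt with String.ofList at the end — exact on ASCII)
def pyLETTERS : List Char :=
  ['A','B','C','D','E','F','G','H','I','J','K','L','M','N','O','P','Q','R','S','T','U','V','W','X','Y','Z']

-- map_num = {str(i): LETTERS[i-1] for i in range(1, 27)}; keys str(i) are kept as their
-- character lists (exact: Python str equality = code-point list equality)
def pyMapNum : PySem.Dict (List Char) Char :=
  (PySem.List.pyRange 1 27 1).foldl
    (fun d i => d.insert (PySem.Int.toChars i) (PySem.List.pyGetD pyLETTERS (i - 1) ' '))  -- index i-1 always in range
    PySem.Dict.empty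

def normalize_user_answer (s : String) (max_labels : Int) : List String :=
  if s = "" then []  -- if not s: return []
  else
    -- s = s.strip().upper()
    let t0 : List Char := PySem.Chars.upper (PySem.Chars.strip s.toList)
    -- for ch in [" ", ",", "/", "&", ";", "|"]: s = s.replace(ch, "")
    let t : List Char := [' ', ',', '/', '&', ';', '|'].foldl
      (fun acc ch => PySem.Chars.replace acc [ch] []) t0
    -- allowed = set(LETTERS[:max_labels])
    let allowed : PySem.Set Char := PySem.Set.ofList (PySem.List.slice pyLETTERS none (some max_labels))
    -- for ch in s: …
    let out : List Char := t.foldl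
      (fun out ch =>
        if allowed.contains ch then out ++ [ch]
        else match pyMapNum.get? [ch] with     -- ch in map_num / map_num[ch]
          | some L => if allowed.contains L then out ++ [L] else out
          | none => out) []
    -- return sorted(set(out), key=lambda x: LETTERS.index(x))  (index always found: out ⊆ LETTERS)
    (PySem.List.sorted (PySem.Set.ofList out) (fun x => (PySem.List.index? pyLETTERS x).getD 0)).map
      (fun c => String.ofList [c])

-- ===== PORT B =====
def normalize_user_answer_alt (s : String) (max_labels : Int) : List String :=
  if s = "" then []  -- if not s: return []
  else
    let t : List Char := PySem.Chars.upper (PySem.Chars.strip s.toList)  -- t = s.strip().upper()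
    -- for i, L in enumerate(LETTERS[:max_labels]): if L in t or (i < 9 and str(i+1) in t): result.append(L)
    ((PySem.List.enumerate (PySem.List.slice pyLETTERS none (some max_labels)) 0).foldl
      (fun res p =>
        if PySem.Chars.isIn [p.2] t || (decide (p.1 < 9) && PySem.Chars.isIn (PySem.Int.toChars (p.1 + 1)) t)
        then res ++ [p.2] else res) []).map (fun c => String.ofList [c])

-- ===== PRECONDITION & SPEC =====
def Spec_normalize_user_answer (s : String) (max_labels : Int) (out : List String) : Prop := out = normalize_user_answer_alt s max_labels
instance (s : String) (max_labels : Int) (out : List String) : Decidable (Spec_normalize_user_answer s max_labels out) := by unfold Spec_normalize_user_answer; infer_instance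

-- ===== CLAIM (what is proved, stated in full; the proofs are below) =====
def Claim_equal_normalize_user_answer : Prop := ∀ (s : String) (max_labels : Int), Dom_normalize_user_answer s max_labels → Spec_normalize_user_answer s max_labels (normalize_user_answer s max_labels)

-- ===== LEMMAS AND PROOFS =====

def digitMap (a : Char) : Option Char :=
  if a = '1' then some 'A' else if a = '2' then some 'B' else if a = '3' then some 'C' else if a = '4' then some 'D' else if a = '5' then some 'E' else if a = '6' then some 'F' else if a = '7' then some 'G' else if a = '8' then some 'H' else if a = '9' then some 'I' else none

def gfun (allowed : PySem.Set Char) (ch : Char) : Option Char :=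
  if allowed.contains ch then some ch
  else match digitMap ch with
    | some L => if allowed.contains L then some L else none
    | none => none

-- s.replace(c, "") for a single character removes every occurrence of that character
theorem replace_go_filter (c : Char) : ∀ (fuel : Nat) (l acc : List Char), l.length ≤ fuel →
    PySem.Chars.replace.go [c] [] fuel l acc = acc.reverse ++ l.filter (· ≠ c) := by
  intro fuel
  induction fuel with
  | zero =>
    intro l acc h
    have : l = [] := List.eq_nil_of_length_eq_zero (Nat.le_zero.mp h)
    subst this
    simp [PySem.Chars.replace.go]
  | succ n ih =>
    intro l acc h
    match l with
    | [] => simp [PySem.Chars.replace.go]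
    | x :: t =>
      rw [PySem.Chars.replace.go]
      by_cases hx : x = c
      · subst hx
        have hp : [x].isPrefixOf (x :: t) = true := by simp [List.isPrefixOf]
        rw [if_pos hp]
        simp only [List.length_cons, Nat.add_le_add_iff_right] at h
        rw [ih _ _ (by simpa using Nat.le_trans (by simp) h)]
        simp [List.filter]
      · have hp : [c].isPrefixOf (x :: t) = false := by
          simp [List.isPrefixOf]
          exact fun hc => absurd hc.symm hx
        rw [if_neg (by simp [hp])]
        simp only [List.length_cons, Nat.add_le_add_iff_right] at h
        rw [ih _ _ h]
        simp [List.filter, hx]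

theorem replace_singleton_eq_filter (c : Char) (cs : List Char) :
    PySem.Chars.replace cs [c] [] = cs.filter (· ≠ c) := by
  rw [PySem.Chars.replace]
  simp [replace_go_filter c cs.length cs [] le_rfl]

theorem mem_removeSeps (t0 : List Char) (c : Char) :
    c ∈ List.foldl (fun acc ch => PySem.Chars.replace acc [ch] []) t0 [' ', ',', '/', '&', ';', '|'] ↔ c ∈ t0 ∧ c ∉ ([' ', ',', '/', '&', ';', '|'] : List Char) := by
  simp [replace_singleton_eq_filter, List.mem_filter]
  tauto

theorem mapNum_items : pyMapNum = PySem.Dict.mk [(['1'],'A'),(['2'],'B'),(['3'],'C'),(['4'],'D'),(['5'],'E'),(['6'],'F'),(['7'],'G'),(['8'],'H'),(['9'],'I'),(['1','0'],'J'),(['1','1'],'K'),(['1','2'],'L'),(['1','3'],'M'),(['1','4'],'N'),(['1','5'],'O'),(['1','6'],'P'),(['1','7'],'Q'),(['1','8'],'R'),(['1','9'],'S'),(['2','0'],'T'),(['2','1'],'U'),(['2','2'],'V'),(['2','3'],'W'),(['2','4'],'X'),(['2','5'],'Y'),(['2','6'],'Z')] := by rfl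

set_option maxHeartbeats 1000000 in
theorem get?_mapNum (a : Char) : pyMapNum.get? [a] = digitMap a := by
  rw [mapNum_items]
  simp only [PySem.Dict.get?_mk_cons, List.cons.injEq, beq_iff_eq, and_true, reduceCtorEq, and_false, if_false]
  simp only [eq_comm]
  rfl

theorem digitMap_eq_some (a c : Char) :
    digitMap a = some c ↔ ∃ j : Nat, j < 9 ∧ a = Char.ofNat (49 + j) ∧ c = pyLETTERS.getD j ' ' := by
  constructor
  · intro h
    unfold digitMap at h
    split_ifs at h with h1 h2 h3 h4 h5 h6 h7 h8 h9 <;>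
      simp only [Option.some.injEq] at h
    · exact ⟨0, by omega, by rw [h1], by rw [← h]; decide⟩
    · exact ⟨1, by omega, by rw [h2], by rw [← h]; decide⟩
    · exact ⟨2, by omega, by rw [h3], by rw [← h]; decide⟩
    · exact ⟨3, by omega, by rw [h4], by rw [← h]; decide⟩
    · exact ⟨4, by omega, by rw [h5], by rw [← h]; decide⟩
    · exact ⟨5, by omega, by rw [h6], by rw [← h]; decide⟩
    · exact ⟨6, by omega, by rw [h7], by rw [← h]; decide⟩
    · exact ⟨7, by omega, by rw [h8], by rw [← h]; decide⟩
    · exact ⟨8, by omega, by rw [h9], by rw [← h]; decide⟩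
  · rintro ⟨j, hj, rfl, rfl⟩
    interval_cases j <;> decide

theorem foldl_step_eq (allowed : PySem.Set Char) : ∀ (l acc : List Char),
    l.foldl (fun out ch =>
      if allowed.contains ch then out ++ [ch]
      else match pyMapNum.get? [ch] with
        | some L => if allowed.contains L then out ++ [L] else out
        | none => out) acc
    = acc ++ l.filterMap (gfun allowed) := by
  intro l
  induction l with
  | nil => simp
  | cons x xs ih =>
    intro acc
    rw [List.foldl_cons, List.filterMap_cons, ih]
    rw [get?_mapNum x]
    by_cases h1 : x ∈ allowed
    · simp [gfun, h1]
    · cases hd : digitMap x with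
      | none => simp [gfun, h1, hd]
      | some L =>
        by_cases h2 : L ∈ allowed
        · simp [gfun, h1, hd, h2]
        · simp [gfun, h1, hd, h2]

theorem pref_take (m : Int) : ∃ k : Nat, PySem.List.slice pyLETTERS none (some m) = pyLETTERS.take k := by
  by_cases h : 0 ≤ m
  · exact ⟨m.toNat, PySem.List.slice_to _ h⟩
  · refine ⟨pyLETTERS.length - (-m).toNat, ?_⟩
    have hm : m = -((-m).toNat : Int) := by omega
    rw [hm, PySem.List.slice_to_neg_natCast _ _ (by omega)]
    congr 1
    omega

theorem pyLETTERS_nodup : pyLETTERS.Nodup := by decide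

set_option maxHeartbeats 1000000 in
set_option maxRecDepth 8192 in
theorem pyLETTERS_pairwise :
    pyLETTERS.Pairwise (fun a b => ((PySem.List.index? pyLETTERS a).getD 0 : Nat) < (PySem.List.index? pyLETTERS b).getD 0) := by
  decide

theorem letters_not_sep : ∀ c ∈ pyLETTERS, c ∉ ([' ', ',', '/', '&', ';', '|'] : List Char) := by
  intro c hc
  fin_cases hc <;> decide

theorem sorted_mem_letters (out : List Char) (hsub : ∀ c ∈ out, c ∈ pyLETTERS) :
    PySem.List.sorted (PySem.Set.ofList out) (fun x => (PySem.List.index? pyLETTERS x).getD 0)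
    = pyLETTERS.filter (fun c => decide (c ∈ out)) := by
  apply PySem.List.sorted_eq_of_perm_of_pairwise_lt
  · rw [List.perm_ext_iff_of_nodup (List.Nodup.filter _ pyLETTERS_nodup) (PySem.Set.nodup_ofList _)]
    intro a
    simp only [List.mem_filter, PySem.Set.mem_ofList, decide_eq_true_eq]
    exact ⟨fun h => h.2, fun h => ⟨hsub a h, h⟩⟩
  · exact List.Pairwise.sublist List.filter_sublist pyLETTERS_pairwise

theorem filter_enum {α : Type} (P : α → Bool) (Q : Int × α → Bool) :
    ∀ (p : List α) (s : Int), (∀ (i : Nat) (hi : i < p.length), P p[i] = Q (s + i, p[i])) →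
    p.filter P = ((PySem.List.enumerate p s).filter Q).map (·.2) := by
  intro p
  induction p with
  | nil => intro s h; simp [PySem.List.enumerate_nil]
  | cons x xs ih =>
    intro s h
    rw [PySem.List.enumerate_cons, List.filter_cons, List.filter_cons]
    have h0 : P x = Q (s, x) := by simpa using h 0 (by simp)
    have hrest := ih (s + 1) (fun i hi => by
      have := h (i + 1) (by simpa using hi)
      simpa [add_assoc, add_comm, add_left_comm] using this)
    rw [← h0, hrest]
    by_cases hP : P x <;> simp [hP]

theorem gfun_eq_some (S : PySem.Set Char) (a c : Char) :
    gfun S a = some c ↔ (a ∈ S ∧ c = a) ∨ (a ∉ S ∧ digitMap a = some c ∧ c ∈ S) := by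
  unfold gfun
  by_cases h1 : a ∈ S
  · simp [h1, eq_comm]
  · cases hd : digitMap a with
    | none => simp [h1]
    | some L =>
      by_cases h2 : L ∈ S
      · simp [h1, h2, eq_comm]
        intro hca
        subst hca
        tauto
      · simp [h1, h2]
        intro hca
        subst hca
        tauto

theorem toChars_succ (j : Nat) (hj : j < 9) :
    PySem.Int.toChars (0 + (j : Int) + 1) = [Char.ofNat (49 + j)] := by
  interval_cases j <;> decide

theorem dchar_not_sep (j : Nat) (hj : j < 9) : Char.ofNat (49 + j) ∉ ([' ', ',', '/', '&', ';', '|'] : List Char) := by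
  interval_cases j <;> decide

theorem dchar_not_letter (j : Nat) (hj : j < 9) : Char.ofNat (49 + j) ∉ pyLETTERS := by
  interval_cases j <;> decide

theorem digitMap_dchar (j : Nat) (hj : j < 9) :
    digitMap (Char.ofNat (49 + j)) = some (pyLETTERS.getD j ' ') := by
  interval_cases j <;> decide

theorem isIn_singleton (c : Char) (t : List Char) : PySem.Chars.isIn [c] t = decide (c ∈ t) := by
  cases h : PySem.Chars.isIn [c] t
  · have := (PySem.Chars.isIn_eq_false_iff _ _).mp h
    rw [List.singleton_infix_iff] at this
    simp [this]
  · have := (PySem.Chars.isIn_iff_infix _ _).mp h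
    rw [List.singleton_infix_iff] at this
    simp [this]

-- ===== VERDICT (by name: the statement is the Claim_ definition above) =====
theorem normalize_user_answer_spec : Claim_equal_normalize_user_answer := by
  intro s m _
  unfold Spec_normalize_user_answer normalize_user_answer normalize_user_answer_alt
  by_cases hs : s = ""
  · simp [hs]
  rw [if_neg hs, if_neg hs]
  dsimp only
  apply congrArg (List.map _)
  -- names
  set t0 : List Char := PySem.Chars.upper (PySem.Chars.strip s.toList) with ht0
  set pref : List Char := PySem.List.slice pyLETTERS none (some m) with hprefdef
  set tA : List Char := List.foldl (fun acc ch => PySem.Chars.replace acc [ch] []) t0 [' ', ',', '/', '&', ';', '|'] with htA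
  obtain ⟨k, hpref⟩ := pref_take m
  rw [foldl_step_eq (PySem.Set.ofList pref) tA []]
  rw [List.nil_append]
  set outl : List Char := tA.filterMap (gfun (PySem.Set.ofList pref)) with houtl
  -- membership characterisation of outl
  have houtl_mem : ∀ c, c ∈ outl ↔
      ∃ a, (a ∈ t0 ∧ a ∉ ([' ', ',', '/', '&', ';', '|'] : List Char)) ∧
        ((a ∈ pref ∧ c = a) ∨ (a ∉ pref ∧ digitMap a = some c ∧ c ∈ pref)) := by
    intro c
    rw [houtl, List.mem_filterMap]
    constructor
    · rintro ⟨a, ha, hg⟩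
      rw [htA, mem_removeSeps] at ha
      rw [gfun_eq_some] at hg
      simp only [PySem.Set.mem_ofList] at hg
      exact ⟨a, ha, hg⟩
    · rintro ⟨a, ha, hg⟩
      refine ⟨a, ?_, ?_⟩
      · rw [htA, mem_removeSeps]; exact ha
      · rw [gfun_eq_some]; simp only [PySem.Set.mem_ofList]; exact hg
  have hsubpref : ∀ c ∈ outl, c ∈ pref := by
    intro c hc
    rw [houtl_mem] at hc
    rcases hc with ⟨a, _, h | h⟩
    · rcases h with ⟨h1, rfl⟩; exact h1
    · exact h.2.2
  have hpref' : pref = List.take k pyLETTERS := by rw [hprefdef, hpref]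
  have hsubL : ∀ c ∈ outl, c ∈ pyLETTERS := by
    intro c hc
    have h1 := hsubpref c hc
    rw [hpref'] at h1
    exact List.take_subset _ _ h1
  rw [sorted_mem_letters outl hsubL]
  -- restrict pyLETTERS.filter to the prefix
  have hfilter : pyLETTERS.filter (fun c => decide (c ∈ outl)) = pref.filter (fun c => decide (c ∈ outl)) := by
    conv_lhs => rw [← List.take_append_drop k pyLETTERS]
    rw [List.filter_append]
    have hnil : (pyLETTERS.drop k).filter (fun c => decide (c ∈ outl)) = [] := by
      rw [List.filter_eq_nil_iff]
      intro c hc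
      simp only [decide_eq_true_eq]
      intro hco
      have h1 : c ∈ pyLETTERS.take k := hpref ▸ hsubpref c hco
      exact absurd hc (List.disjoint_take_drop pyLETTERS_nodup le_rfl h1)
    rw [hnil, List.append_nil, ← hpref]
  rw [hfilter]
  -- the B-side loop collects exactly the letters passing its test
  rw [PySem.List.foldl_append_if, List.nil_append]
  -- the per-letter condition
  apply filter_enum
  intro i hi
  have hik : i < pyLETTERS.length := by
    have h2 := hi
    rw [hpref'] at h2
    simp [List.length_take] at h2
    omega
  have hgetL : pref[i] = pyLETTERS[i]'hik := by
    simp [hpref', List.getElem_take]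
  have hLpref : pref[i] ∈ pref := List.getElem_mem hi
  have hLnotsep : pref[i] ∉ ([' ', ',', '/', '&', ';', '|'] : List Char) := by
    rw [hgetL]; exact letters_not_sep _ (List.getElem_mem hik)
  rw [Bool.eq_iff_iff]
  simp only [Bool.or_eq_true, Bool.and_eq_true, decide_eq_true_eq, isIn_singleton]
  rw [houtl_mem]
  constructor
  · rintro ⟨a, ⟨hat0, _⟩, hcase⟩
    rcases hcase with ⟨_, rfl⟩ | ⟨hanp, hdm, _⟩
    · exact Or.inl hat0
    · rw [digitMap_eq_some] at hdm
      obtain ⟨j, hj9, rfl, hLj⟩ := hdm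
      have hj26 : j < pyLETTERS.length := by simp [pyLETTERS]; omega
      have hLj' : pref[i] = pyLETTERS[j]'hj26 := by
        rw [hLj, List.getD_eq_getElem _ _ hj26]
      have hij : i = j :=
        (List.Nodup.getElem_inj_iff pyLETTERS_nodup).mp (hgetL.symm.trans hLj')
      subst hij
      refine Or.inr ⟨by omega, ?_⟩
      rw [toChars_succ i hj9, isIn_singleton]
      simpa using hat0
  · rintro (ht0mem | ⟨hi9, hdig⟩)
    · exact ⟨pref[i], ⟨ht0mem, hLnotsep⟩, Or.inl ⟨hLpref, rfl⟩⟩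
    · have hi9' : i < 9 := by omega
      rw [toChars_succ i hi9', isIn_singleton] at hdig
      simp only [decide_eq_true_eq] at hdig
      refine ⟨Char.ofNat (49 + i), ⟨hdig, dchar_not_sep i hi9'⟩, Or.inr ⟨?_, ?_, hLpref⟩⟩
      · intro hmem
        rw [hpref'] at hmem
        exact dchar_not_letter i hi9' (List.take_subset _ _ hmem)
      · rw [digitMap_dchar i hi9', hgetL, List.getD_eq_getElem _ _ hik]
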